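-- pv_equiv track=rewrite | github.com/jan3dev/aqua-mcp | src/aqua/sideswap.py | _pick_most_progressed_txn
-- ===== SOURCE A (Python) =====
-- _TX_STATE_RANK = {
--     "Done": 4,
--     "Processing": 3,
--     "InsufficientAmount": 2,
--     "Detected": 1,
--     None: 0,
--     "": 0,
-- }
--
-- def _pick_most_progressed_txn(txns: list[dict]) -> dict:
--     """Return the txns list entry whose tx_state is furthest along.
--
--     Ties go to the later entry (i.e. the txn the server reported last).
--     """
--     best_idx = 0
--     best_rank = -1
--     for i, t in enumerate(txns):
--         rank = _TX_STATE_RANK.get(t.get("tx_state"), 0)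
--         if rank >= best_rank:
--             best_rank = rank
--             best_idx = i
--     return txns[best_idx]
-- ===== SOURCE B (Python) =====
-- _TX_STATE_RANK = {
--     "Done": 4,
--     "Processing": 3,
--     "InsufficientAmount": 2,
--     "Detected": 1,
--     None: 0,
--     "": 0,
-- }
--
-- def _pick_most_progressed_txn(txns: list[dict]) -> dict:
--     """Return the txns list entry whose tx_state is furthest along.
--
--     Ranks are a fixed bounded set (0..4), so instead of tracking a running
--     maximum we search by descending rank: for each rank from highest to
--     lowest, return the last txn holding it (first hit scanning backwards).
--     Ties go to the later entry by construction.
--     """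
--     for want in (4, 3, 2, 1, 0):
--         for t in reversed(txns):
--             if _TX_STATE_RANK.get(t.get("tx_state"), 0) == want:
--                 return t
-- ===== Notes on version B (the rewrite author's own statement) =====
-- stated objective: alternative
-- what changed: Replaces the running-maximum accumulator scan with a staged search over the fixed bounded rank domain: for each rank 4,3,2,1,0 in turn, scan the list backwards and return the first txn holding that rank, so no best-so-far state or comparisons between entries exist at all.
import Mathlib
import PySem

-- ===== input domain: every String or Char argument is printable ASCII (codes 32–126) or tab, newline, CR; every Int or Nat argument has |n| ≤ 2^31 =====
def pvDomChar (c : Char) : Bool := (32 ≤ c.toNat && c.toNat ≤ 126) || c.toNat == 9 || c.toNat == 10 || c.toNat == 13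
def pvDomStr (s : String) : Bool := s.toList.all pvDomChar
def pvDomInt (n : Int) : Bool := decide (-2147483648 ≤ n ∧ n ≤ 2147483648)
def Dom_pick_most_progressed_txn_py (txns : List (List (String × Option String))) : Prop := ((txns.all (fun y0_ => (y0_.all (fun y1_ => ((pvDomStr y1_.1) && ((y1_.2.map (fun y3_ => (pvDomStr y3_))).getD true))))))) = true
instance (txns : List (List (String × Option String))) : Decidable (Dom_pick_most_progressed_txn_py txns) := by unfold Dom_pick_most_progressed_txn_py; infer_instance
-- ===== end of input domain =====

-- B replaces A's running-maximum accumulator scan with a staged search over the fixed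
-- bounded rank domain (for each rank 4..0, return the first hit scanning backwards):
-- an alternative algorithm of the same cost.

-- the module constant _TX_STATE_RANK (keys are t.get("tx_state") values: Option String)
def txStateRank : PySem.Dict (Option String) Int :=
  PySem.Dict.ofList [(some "Done", 4), (some "Processing", 3), (some "InsufficientAmount", 2),
                     (some "Detected", 1), (none, 0), (some "", 0)]

-- rank = _TX_STATE_RANK.get(t.get("tx_state"), 0)
def txRank (t : List (String × Option String)) : Int :=
  PySem.Dict.getD txStateRank (PySem.Dict.getD (PySem.Dict.mk t) "tx_state" none) 0

-- ===== PORT A =====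
-- the 'for i, t in enumerate(txns)' loop, carrying (i, best_idx, best_rank)
def pickLoopA (i : Nat) (best_idx : Nat) (best_rank : Int) :
    List (List (String × Option String)) → Nat × Int
  | [] => (best_idx, best_rank)
  | t :: rest =>
      if txRank t ≥ best_rank then pickLoopA (i + 1) i (txRank t) rest
      else pickLoopA (i + 1) best_idx best_rank rest

def pick_most_progressed_txn_py (txns : List (List (String × Option String))) :
    List (String × Option String) :=
  -- return txns[best_idx]; pyGet? = none only for txns = [] (IndexError, excluded by Pre_)
  (PySem.List.pyGet? txns ((pickLoopA 0 0 (-1) txns).1 : Int)).getD []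

-- ===== PORT B =====
def pick_most_progressed_txn_py_alt (txns : List (List (String × Option String))) :
    List (String × Option String) :=
  -- for want in (4,3,2,1,0): for t in reversed(txns): if rank == want: return t
  -- falling off the end (empty txns only) returns Python None; excluded by Pre_
  (([4, 3, 2, 1, 0] : List Int).findSome?
      (fun want => txns.reverse.find? (fun t => txRank t == want))).getD []

-- ===== PRECONDITION & SPEC =====
-- A raises IndexError on the empty list (txns[0]); B falls through and returns None there.
def Pre_pick_most_progressed_txn_py (txns : List (List (String × Option String))) : Prop :=
  txns ≠ []
instance (txns : List (List (String × Option String))) : Decidable (Pre_pick_most_progressed_txn_py txns) := by unfold Pre_pick_most_progressed_txn_py; infer_instance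

def pvWitness_pick_most_progressed_txn_py : (List (List (String × Option String))) :=
  [[("tx_state", some "Detected")], [("tx_state", some "Done")]]

def Spec_pick_most_progressed_txn_py (txns : List (List (String × Option String))) (out : List (String × Option String)) : Prop := out = pick_most_progressed_txn_py_alt txns
instance (txns : List (List (String × Option String))) (out : List (String × Option String)) : Decidable (Spec_pick_most_progressed_txn_py txns out) := by unfold Spec_pick_most_progressed_txn_py; infer_instance

-- ===== CLAIM (what is proved, stated in full; the proofs are below) =====
def Claim_equal_pick_most_progressed_txn_py : Prop := ∀ (txns : List (List (String × Option String))), Dom_pick_most_progressed_txn_py txns → Pre_pick_most_progressed_txn_py txns → Spec_pick_most_progressed_txn_py txns (pick_most_progressed_txn_py txns)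

-- ===== LEMMAS AND PROOFS =====

-- every rank lies in [0, 4] (dict values and default do)
theorem txRank_bounds (t : List (String × Option String)) : 0 ≤ txRank t ∧ txRank t ≤ 4 := by
  unfold txRank
  rw [PySem.Dict.getD_eq_get?_getD]
  cases hf : PySem.Dict.get? txStateRank ((PySem.Dict.mk t).getD "tx_state" none) with
  | none => simp
  | some v =>
      have hm := PySem.Dict.mem_items_of_get?_eq_some _ hf
      have hitems : txStateRank.items = [(some "Done", 4), (some "Processing", 3),
          (some "InsufficientAmount", 2), (some "Detected", 1), (none, 0), (some "", 0)] := by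
        decide
      rw [hitems] at hm
      simp at hm
      rcases hm with ⟨_, h⟩ | ⟨_, h⟩ | ⟨_, h⟩ | ⟨_, h⟩ | ⟨_, h⟩ | ⟨_, h⟩ <;> subst h <;> simp

-- "last index of a ≥-maximum" done on elements instead of indices
def pickGe (b : List (String × Option String)) (rest : List (List (String × Option String))) :
    List (String × Option String) :=
  rest.foldl (fun best c => if txRank c ≥ txRank best then c else best) b

theorem drop_cons {α : Type} : ∀ (l : List α) (i : Nat) (t : α) (r : List α),
    l.drop i = t :: r → l[i]? = some t ∧ l.drop (i + 1) = r := by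
  intro l
  induction l with
  | nil => intro i t r h; simp at h
  | cons x xs ih =>
      intro i t r h
      cases i with
      | zero => simp_all
      | succ n =>
          simp at h ⊢
          exact ih n t r h

-- A's loop, once it holds a real element (best_rank = txRank b, txns[best_idx] = b),
-- returns the index of pickGe b rest.
theorem pickLoopA_spec (full : List (List (String × Option String))) :
    ∀ (rest : List (List (String × Option String))) (i bi : Nat) (b : List (String × Option String)),
      full.drop i = rest → full[bi]? = some b →
      full[(pickLoopA i bi (txRank b) rest).1]? = some (pickGe b rest) := by
  intro rest
  induction rest with
  | nil => intro i bi b _ hb; simpa [pickLoopA, pickGe] using hb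
  | cons t r ih =>
      intro i bi b hdrop hb
      obtain ⟨hget, hdrop'⟩ := drop_cons full i t r hdrop
      unfold pickLoopA
      by_cases h : txRank t ≥ txRank b
      · simp only [h, if_true]
        have := ih (i + 1) i t hdrop' hget
        simpa [pickGe, h] using this
      · simp only [h, if_false]
        have := ih (i + 1) bi b hdrop' hb
        simpa [pickGe, h] using this

-- first strict maximum of the reversal = last ≥-maximum of the list (bridge machinery)
def pickGt (b : List (String × Option String)) (rest : List (List (String × Option String))) :
    List (String × Option String) :=
  rest.foldl (fun best c => if txRank c > txRank best then c else best) b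

-- running maximum of the ranks of b :: t
def maxR (b : List (String × Option String)) (t : List (List (String × Option String))) : Int :=
  t.foldl (fun m c => max m (txRank c)) (txRank b)

theorem maxR_cons (b c : List (String × Option String)) (t : List (List (String × Option String))) :
    maxR b (c :: t) = maxR (if txRank c > txRank b then c else b) t := by
  simp only [maxR, List.foldl_cons]
  congr 1
  split_ifs with h <;> omega

theorem le_maxR : ∀ (t : List (List (String × Option String))) (b : List (String × Option String)),
    txRank b ≤ maxR b t := by
  intro t
  induction t with
  | nil => intro b; simp [maxR]
  | cons c t' ih =>
      intro b
      rw [maxR_cons]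
      split_ifs with h
      · exact le_trans (le_of_lt h) (ih c)
      · exact ih b

theorem mem_le_maxR : ∀ (t : List (List (String × Option String)))
    (b x : List (String × Option String)), x ∈ t → txRank x ≤ maxR b t := by
  intro t
  induction t with
  | nil => intro b x hx; simp at hx
  | cons c t' ih =>
      intro b x hx
      rw [maxR_cons]
      rcases List.mem_cons.mp hx with h | h
      · subst h
        split_ifs with hc
        · exact le_maxR t' x
        · exact le_trans (by omega) (le_maxR t' b)
      · split_ifs with hc <;> exact ih _ x h

theorem rank_pickGt : ∀ (t : List (List (String × Option String)))
    (b : List (String × Option String)), txRank (pickGt b t) = maxR b t := by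
  intro t
  induction t with
  | nil => intro b; simp [pickGt, maxR]
  | cons c t' ih =>
      intro b
      rw [maxR_cons]
      simp only [pickGt, List.foldl_cons]
      split_ifs with h <;> exact ih _

theorem pickGt_of_max : ∀ (t : List (List (String × Option String)))
    (b : List (String × Option String)), txRank b = maxR b t → pickGt b t = b := by
  intro t
  induction t with
  | nil => intro b _; simp [pickGt]
  | cons c t' ih =>
      intro b hb
      rw [maxR_cons] at hb
      by_cases h : txRank c > txRank b
      · exfalso
        rw [if_pos h] at hb
        have := le_maxR t' c
        omega
      · rw [if_neg h] at hb
        simp only [pickGt, List.foldl_cons, if_neg h]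
        exact ih b hb

-- find over the tail only, when the head does not attain the maximum
theorem find_tail_of_lt : ∀ (t : List (List (String × Option String)))
    (b : List (String × Option String)), txRank b < maxR b t →
    t.find? (fun x => txRank x == maxR b t) = some (pickGt b t) := by
  intro t
  induction t with
  | nil => intro b h; simp [maxR] at h
  | cons c t' ih =>
      intro b hb
      rw [maxR_cons] at hb ⊢
      by_cases h : txRank c > txRank b
      · rw [if_pos h] at hb ⊢
        simp only [pickGt, List.foldl_cons, if_pos h]
        by_cases hc : txRank c = maxR c t'
        · rw [List.find?_cons_of_pos (by simpa using hc)]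
          exact congrArg some (pickGt_of_max t' c hc).symm
        · have hlt : txRank c < maxR c t' := lt_of_le_of_ne (le_maxR t' c) hc
          rw [List.find?_cons_of_neg (by simpa using hc)]
          exact ih c hlt
      · rw [if_neg h] at hb ⊢
        simp only [pickGt, List.foldl_cons, if_neg h]
        have hc : txRank c ≠ maxR b t' := by omega
        rw [List.find?_cons_of_neg (by simpa using hc)]
        exact ih b hb

theorem find_cons_max (t : List (List (String × Option String)))
    (b : List (String × Option String)) :
    (b :: t).find? (fun x => txRank x == maxR b t) = some (pickGt b t) := by
  by_cases hb : txRank b = maxR b t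
  · rw [List.find?_cons_of_pos (by simpa using hb)]
    rw [pickGt_of_max t b hb]
  · have hlt : txRank b < maxR b t := lt_of_le_of_ne (le_maxR t b) hb
    rw [List.find?_cons_of_neg (by simpa using hb)]
    exact find_tail_of_lt t b hlt

theorem find_none_of_gt (t : List (List (String × Option String)))
    (b : List (String × Option String)) (r : Int) (hr : maxR b t < r) :
    (b :: t).find? (fun x => txRank x == r) = none := by
  rw [List.find?_eq_none]
  intro x hx
  rcases List.mem_cons.mp hx with h | h
  · subst h
    have := le_maxR t x
    simpa using (by omega : ¬ txRank x = r)
  · have := mem_le_maxR t b x h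
    simpa using (by omega : ¬ txRank x = r)

-- B on a nonempty reversed list b :: s produces pickGt b s
theorem alt_eq_pickGt (b : List (String × Option String))
    (s : List (List (String × Option String))) :
    (([4, 3, 2, 1, 0] : List Int).findSome?
        (fun want => (b :: s).find? (fun t => txRank t == want))).getD []
      = pickGt b s := by
  have hM := find_cons_max s b
  have h0 : 0 ≤ maxR b s := le_trans (txRank_bounds b).1 (le_maxR s b)
  have h4 : maxR b s ≤ 4 := by
    have := rank_pickGt s b
    have := (txRank_bounds (pickGt b s)).2
    omega
  have hnone : ∀ r : Int, maxR b s < r →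
      (b :: s).find? (fun x => txRank x == r) = none := fun r hr => find_none_of_gt s b r hr
  have hcases : maxR b s = 4 ∨ maxR b s = 3 ∨ maxR b s = 2 ∨ maxR b s = 1 ∨ maxR b s = 0 := by
    omega
  rcases hcases with h | h | h | h | h
  · rw [h] at hM
    simp [List.findSome?, hM]
  · rw [h] at hM
    simp [List.findSome?, hnone 4 (by omega), hM]
  · rw [h] at hM
    simp [List.findSome?, hnone 4 (by omega), hnone 3 (by omega), hM]
  · rw [h] at hM
    simp [List.findSome?, hnone 4 (by omega), hnone 3 (by omega), hnone 2 (by omega), hM]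
  · rw [h] at hM
    simp [List.findSome?, hnone 4 (by omega), hnone 3 (by omega), hnone 2 (by omega),
      hnone 1 (by omega), hM]

-- headCombine machinery relating pickGe (on the list) to pickGt (on the reversal)
def headCombine (h : List (String × Option String)) :
    Option (List (String × Option String)) → List (String × Option String)
  | none => h
  | some m => if txRank h > txRank m then h else m

def pickGe? : List (List (String × Option String)) → Option (List (String × Option String))
  | [] => none
  | h :: t => some (pickGe h t)

def pickGt? : List (List (String × Option String)) → Option (List (String × Option String))
  | [] => none
  | h :: t => some (pickGt h t)

theorem pickGe_headCombine :
    ∀ (t : List (List (String × Option String))) (h : List (String × Option String)),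
      pickGe h t = headCombine h (pickGe? t) := by
  intro t
  induction t with
  | nil => intro h; simp [pickGe, headCombine, pickGe?]
  | cons c t' ih =>
      intro h
      have l1 : pickGe h (c :: t') = pickGe (if txRank c ≥ txRank h then c else h) t' := by
        simp [pickGe]
      rw [l1, ih]
      show _ = headCombine h (some (pickGe c t'))
      rw [ih c]
      cases hc : pickGe? t' with
      | none =>
          simp only [headCombine]
          split_ifs <;> first | rfl | omega
      | some m =>
          simp only [headCombine]
          split_ifs <;> first | rfl | omega

theorem pickGt?_append_singleton (xs : List (List (String × Option String)))
    (h : List (String × Option String)) :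
    pickGt? (xs ++ [h]) = some (headCombine h (pickGt? xs)) := by
  cases xs with
  | nil => simp [pickGt?, pickGt, headCombine]
  | cons x xs' =>
      simp [List.cons_append, pickGt?, pickGt, List.foldl_append, headCombine]

-- first strict maximum of the reversal = last ≥-maximum of the list
theorem pickGt?_reverse :
    ∀ (l : List (List (String × Option String))), pickGt? l.reverse = pickGe? l := by
  intro l
  induction l with
  | nil => rfl
  | cons h t ih =>
      rw [List.reverse_cons, pickGt?_append_singleton, ih]
      cases ht : pickGe? t with
      | none =>
          cases t with
          | nil => simp [pickGe?, pickGe, headCombine]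
          | cons a b => simp [pickGe?] at ht
      | some m =>
          show some (headCombine h (some m)) = pickGe? (h :: t)
          simp only [pickGe?]
          rw [pickGe_headCombine t h, ht]

-- ===== VERDICT (by name: the statement is the Claim_ definition above) =====
theorem pick_most_progressed_txn_py_spec : Claim_equal_pick_most_progressed_txn_py := by
  intro txns _ hpre
  unfold Spec_pick_most_progressed_txn_py
  cases txns with
  | nil => exact absurd rfl hpre
  | cons h t =>
      -- A side: first iteration always updates (rank ≥ 0 > -1)
      have h0 : txRank h ≥ (-1 : Int) := le_trans (by norm_num) (txRank_bounds h).1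
      have hA : pickLoopA 0 0 (-1) (h :: t) = pickLoopA 1 0 (txRank h) t := by
        conv_lhs => rw [pickLoopA]
        rw [if_pos h0]
      have hspec := pickLoopA_spec (h :: t) t 1 0 h (by simp) (by simp)
      have hAval : pick_most_progressed_txn_py (h :: t) = pickGe h t := by
        unfold pick_most_progressed_txn_py
        rw [hA]
        rw [PySem.List.pyGet?_natCast]
        rw [hspec]
        rfl
      -- B side: case the nonempty reversal as b :: s
      have hB : pick_most_progressed_txn_py_alt (h :: t) = pickGe h t := by
        unfold pick_most_progressed_txn_py_alt
        have hgt := pickGt?_reverse (h :: t)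
        cases hr : (h :: t).reverse with
        | nil => simp at hr
        | cons b s =>
            rw [hr] at hgt
            simp only [pickGt?, pickGe?, Option.some.injEq] at hgt
            rw [alt_eq_pickGt b s, hgt]
      rw [hAval, hB]
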